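-- pv_equiv track=rewrite | github.com/alkaosar-ck/CodeForces-Problems-Solution-Python- | CodeForces-1176A.py | calculate
-- ===== SOURCE A (Python) =====
-- def calculate(i):
--    count = 0
--    while i!=1:
--       if i%2 == 0:
--          count+=1
--          i = (i//2)
--       elif i%3 == 0:
--          count+=1
--          i = (2*i)//3
--       elif i%5 == 0:
--          count+=1
--          i = (4*i)//5
--       else:
--          return -1
--    return count
-- ===== SOURCE B (Python) =====
-- def calculate(i):
--     count = 0
--     while i % 2 == 0:
--         i //= 2
--         count += 1
--     while i % 3 == 0:
--         i //= 3
--         count += 2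
--     while i % 5 == 0:
--         i //= 5
--         count += 3
--     return count if i == 1 else -1
-- ===== Notes on version B (the rewrite author's own statement) =====
-- stated objective: simpler
-- what changed: B strips the prime factors 2, 3 and 5 in three separate plain floor-division loops with step costs 1/2/3 instead of simulating A's transform i->i//2, 2i//3, 4i//5 step by step.
import Mathlib
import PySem

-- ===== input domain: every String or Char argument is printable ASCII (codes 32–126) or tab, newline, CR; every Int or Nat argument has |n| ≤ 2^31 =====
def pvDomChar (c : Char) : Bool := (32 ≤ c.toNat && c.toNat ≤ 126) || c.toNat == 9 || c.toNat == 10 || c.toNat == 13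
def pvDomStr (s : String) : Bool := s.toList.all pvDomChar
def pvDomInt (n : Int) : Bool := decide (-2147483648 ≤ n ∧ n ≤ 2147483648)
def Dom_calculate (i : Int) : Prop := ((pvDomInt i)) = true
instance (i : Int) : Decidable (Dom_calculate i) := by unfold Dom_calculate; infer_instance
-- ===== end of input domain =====

-- B replaces A's step-by-step simulation (i//2, 2i//3, 4i//5) by three plain
-- factor-stripping loops with step costs 1/2/3; objective: simpler.
-- The Nat fuel arguments only make the Lean recursions total; fuel |i|+1 is
-- proved sufficient on Pre_ (i ≠ 0), and Python loops forever at i = 0.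

-- ===== PORT A =====
-- A's while-loop, step for step.
def calcLoop : Nat → Int → Int → Int
  | 0, _, _ => -1
  | fuel + 1, i, count =>
    if i = 1 then count
    else if PySem.Int.mod i 2 = 0 then calcLoop fuel (PySem.Int.floordiv i 2) (count + 1)
    else if PySem.Int.mod i 3 = 0 then calcLoop fuel (PySem.Int.floordiv (2 * i) 3) (count + 1)
    else if PySem.Int.mod i 5 = 0 then calcLoop fuel (PySem.Int.floordiv (4 * i) 5) (count + 1)
    else -1

def calculate (i : Int) : Int := calcLoop (i.natAbs + 1) i 0

-- ===== PORT B =====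
-- The three 'while i % p == 0' loops of Source B.
def strip2 : Nat → Int → Int → Int × Int
  | 0, i, count => (i, count)
  | fuel + 1, i, count =>
    if PySem.Int.mod i 2 = 0 then strip2 fuel (PySem.Int.floordiv i 2) (count + 1)
    else (i, count)

def strip3 : Nat → Int → Int → Int × Int
  | 0, i, count => (i, count)
  | fuel + 1, i, count =>
    if PySem.Int.mod i 3 = 0 then strip3 fuel (PySem.Int.floordiv i 3) (count + 2)
    else (i, count)

def strip5 : Nat → Int → Int → Int × Int
  | 0, i, count => (i, count)
  | fuel + 1, i, count =>
    if PySem.Int.mod i 5 = 0 then strip5 fuel (PySem.Int.floordiv i 5) (count + 3)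
    else (i, count)

def calculate_alt (i : Int) : Int :=
  let p2 := strip2 (i.natAbs + 1) i 0
  let p3 := strip3 (p2.1.natAbs + 1) p2.1 p2.2
  let p5 := strip5 (p3.1.natAbs + 1) p3.1 p3.2
  if p5.1 = 1 then p5.2 else -1

-- ===== PRECONDITION & SPEC =====
-- Pre_ excludes only i = 0, on which the Python A never returns (its while
-- loop keeps dividing 0 by 2 forever).
def Pre_calculate (i : Int) : Prop := i ≠ 0
instance (i : Int) : Decidable (Pre_calculate i) := by unfold Pre_calculate; infer_instance
def pvWitness_calculate : Int := (10)

def Spec_calculate (i : Int) (out : Int) : Prop := out = calculate_alt i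
instance (i : Int) (out : Int) : Decidable (Spec_calculate i out) := by unfold Spec_calculate; infer_instance

-- ===== CLAIM (what is proved, stated in full; the proofs are below) =====
def Claim_equal_calculate : Prop := ∀ (i : Int), Dom_calculate i → Pre_calculate i → Spec_calculate i (calculate i)

-- ===== LEMMAS AND PROOFS =====

-- bridges to Int emod/ediv (divisors here are 2,3,5 > 0).
theorem pmod (i p : Int) (hp : 0 < p) : PySem.Int.mod i p = i % p :=
  PySem.Int.mod_eq_emod_of_pos hp

theorem pdiv (i p : Int) (hp : 0 < p) : PySem.Int.floordiv i p = i / p :=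
  PySem.Int.floordiv_eq_ediv_of_pos hp

-- uncurried strip stages (with self-sufficient fuel) and B's pipeline from an
-- arbitrary starting count (calculate_alt i is definitionally altFrom i 0).
def sF2 (i c : Int) : Int × Int := strip2 (i.natAbs + 1) i c
def s3 : Int × Int → Int × Int
  | (i, c) => strip3 (i.natAbs + 1) i c
def s5 : Int × Int → Int × Int
  | (i, c) => strip5 (i.natAbs + 1) i c
def finish5 (p : Int × Int) : Int := if p.1 = 1 then p.2 else -1
def altFrom (i c : Int) : Int := finish5 (s5 (s3 (sF2 i c)))

-- one-step unfoldings of the strip loops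
theorem strip2_stepL (f : Nat) {i c : Int} (h : i % 2 = 0) :
    strip2 (f + 1) i c = strip2 f (i / 2) (c + 1) := by
  rw [strip2, pmod i 2 (by norm_num), pdiv i 2 (by norm_num)]; simp [h]

theorem strip2_stopL (f : Nat) {i c : Int} (h : i % 2 ≠ 0) : strip2 (f + 1) i c = (i, c) := by
  rw [strip2, pmod i 2 (by norm_num)]; simp [h]

theorem strip3_stepL (f : Nat) {i c : Int} (h : i % 3 = 0) :
    strip3 (f + 1) i c = strip3 f (i / 3) (c + 2) := by
  rw [strip3, pmod i 3 (by norm_num), pdiv i 3 (by norm_num)]; simp [h]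

theorem strip3_stopL (f : Nat) {i c : Int} (h : i % 3 ≠ 0) : strip3 (f + 1) i c = (i, c) := by
  rw [strip3, pmod i 3 (by norm_num)]; simp [h]

theorem strip5_stepL (f : Nat) {i c : Int} (h : i % 5 = 0) :
    strip5 (f + 1) i c = strip5 f (i / 5) (c + 3) := by
  rw [strip5, pmod i 5 (by norm_num), pdiv i 5 (by norm_num)]; simp [h]

theorem strip5_stopL (f : Nat) {i c : Int} (h : i % 5 ≠ 0) : strip5 (f + 1) i c = (i, c) := by
  rw [strip5, pmod i 5 (by norm_num)]; simp [h]

-- enough fuel makes the strip loops fuel-independent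
theorem strip2_irrel (n : Nat) : ∀ (f g : Nat) (i c : Int), i.natAbs ≤ n →
    i.natAbs ≤ f → i.natAbs ≤ g → i ≠ 0 → strip2 (f + 1) i c = strip2 (g + 1) i c := by
  induction n with
  | zero => intro f g i c hn hf hg h0; omega
  | succ n ih =>
    intro f g i c hn hf hg h0
    by_cases h : i % 2 = 0
    · rw [show f + 1 = (f - 1) + 1 + 1 from by omega, strip2_stepL _ h,
        show g + 1 = (g - 1) + 1 + 1 from by omega, strip2_stepL _ h]
      exact ih (f - 1) (g - 1) _ _ (by omega) (by omega) (by omega) (by omega)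
    · rw [strip2_stopL _ h, strip2_stopL _ h]

theorem strip3_irrel (n : Nat) : ∀ (f g : Nat) (i c : Int), i.natAbs ≤ n →
    i.natAbs ≤ f → i.natAbs ≤ g → i ≠ 0 → strip3 (f + 1) i c = strip3 (g + 1) i c := by
  induction n with
  | zero => intro f g i c hn hf hg h0; omega
  | succ n ih =>
    intro f g i c hn hf hg h0
    by_cases h : i % 3 = 0
    · rw [show f + 1 = (f - 1) + 1 + 1 from by omega, strip3_stepL _ h,
        show g + 1 = (g - 1) + 1 + 1 from by omega, strip3_stepL _ h]
      exact ih (f - 1) (g - 1) _ _ (by omega) (by omega) (by omega) (by omega)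
    · rw [strip3_stopL _ h, strip3_stopL _ h]

theorem strip5_irrel (n : Nat) : ∀ (f g : Nat) (i c : Int), i.natAbs ≤ n →
    i.natAbs ≤ f → i.natAbs ≤ g → i ≠ 0 → strip5 (f + 1) i c = strip5 (g + 1) i c := by
  induction n with
  | zero => intro f g i c hn hf hg h0; omega
  | succ n ih =>
    intro f g i c hn hf hg h0
    by_cases h : i % 5 = 0
    · rw [show f + 1 = (f - 1) + 1 + 1 from by omega, strip5_stepL _ h,
        show g + 1 = (g - 1) + 1 + 1 from by omega, strip5_stepL _ h]
      exact ih (f - 1) (g - 1) _ _ (by omega) (by omega) (by omega) (by omega)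
    · rw [strip5_stopL _ h, strip5_stopL _ h]

-- step/stop laws of the self-sufficient stages
theorem sF2_stop {i c : Int} (h : i % 2 ≠ 0) : sF2 i c = (i, c) :=
  strip2_stopL _ h

theorem sF2_step {i c : Int} (h0 : i ≠ 0) (h : i % 2 = 0) : sF2 i c = sF2 (i / 2) (c + 1) := by
  unfold sF2
  rw [show i.natAbs + 1 = (i.natAbs - 1) + 1 + 1 from by omega, strip2_stepL _ h]
  exact strip2_irrel i.natAbs _ _ _ _ (by omega) (by omega) (by omega) (by omega)

theorem s3_stop {i c : Int} (h : i % 3 ≠ 0) : s3 (i, c) = (i, c) :=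
  strip3_stopL _ h

theorem s3_step {i c : Int} (h0 : i ≠ 0) (h : i % 3 = 0) : s3 (i, c) = s3 (i / 3, c + 2) := by
  show strip3 (i.natAbs + 1) i c = strip3 ((i / 3).natAbs + 1) (i / 3) (c + 2)
  rw [show i.natAbs + 1 = (i.natAbs - 1) + 1 + 1 from by omega, strip3_stepL _ h]
  exact strip3_irrel i.natAbs _ _ _ _ (by omega) (by omega) (by omega) (by omega)

theorem s5_stop {i c : Int} (h : i % 5 ≠ 0) : s5 (i, c) = (i, c) :=
  strip5_stopL _ h

theorem s5_step {i c : Int} (h0 : i ≠ 0) (h : i % 5 = 0) : s5 (i, c) = s5 (i / 5, c + 3) := by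
  show strip5 (i.natAbs + 1) i c = strip5 ((i / 5).natAbs + 1) (i / 5) (c + 3)
  rw [show i.natAbs + 1 = (i.natAbs - 1) + 1 + 1 from by omega, strip5_stepL _ h]
  exact strip5_irrel i.natAbs _ _ _ _ (by omega) (by omega) (by omega) (by omega)

theorem loop_eq (f : Nat) : ∀ i c : Int, i.natAbs ≤ f → i ≠ 0 →
    calcLoop (f + 1) i c = altFrom i c := by
  induction f with
  | zero => intro i c hle h0; omega
  | succ f ih =>
    intro i c hle h0
    by_cases h1 : i = 1
    · subst h1
      have hB : altFrom 1 c = c := by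
        unfold altFrom
        rw [sF2_stop (by decide), s3_stop (by decide), s5_stop (by decide)]
        simp [finish5]
      rw [hB, calcLoop]; simp
    by_cases h2 : i % 2 = 0
    · -- A halves; B's first strip loop takes the same step.
      have hA : calcLoop (f + 1 + 1) i c = calcLoop (f + 1) (i / 2) (c + 1) := by
        rw [calcLoop, pmod i 2 (by norm_num), pdiv i 2 (by norm_num)]
        simp [h1, h2]
      rw [hA, ih _ _ (by omega) (by omega)]
      exact (congrArg (fun p => finish5 (s5 (s3 p))) (sF2_step h0 h2)).symm
    by_cases h3 : i % 3 = 0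
    · -- A maps i ↦ 2i/3; both sides reach the strip state (i/3, c+2).
      have hk : 2 * i / 3 = 2 * (i / 3) := by omega
      have hko : (i / 3) % 2 ≠ 0 := by omega
      have hk0 : (2 : Int) * (i / 3) ≠ 0 := by omega
      have hA : calcLoop (f + 1 + 1) i c = calcLoop (f + 1) (2 * (i / 3)) (c + 1) := by
        rw [calcLoop, pmod i 2 (by norm_num), pmod i 3 (by norm_num),
          pdiv (2 * i) 3 (by norm_num)]
        simp [h1, h2, h3, hk]
      have hB : altFrom i c = altFrom (2 * (i / 3)) (c + 1) := by
        unfold altFrom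
        rw [sF2_stop h2, sF2_step hk0 (by omega),
          show (2 : Int) * (i / 3) / 2 = i / 3 by omega, sF2_stop hko,
          s3_step h0 h3, show c + 1 + 1 = c + 2 from by ring]
      rw [hA, hB]
      exact ih _ _ (by omega) hk0
    by_cases h5 : i % 5 = 0
    · -- A maps i ↦ 4i/5; both sides reach the strip state (i/5, c+3).
      have hk : 4 * i / 5 = 4 * (i / 5) := by omega
      have hko : (i / 5) % 2 ≠ 0 := by omega
      have hk3 : (i / 5) % 3 ≠ 0 := by omega
      have hk0 : (4 : Int) * (i / 5) ≠ 0 := by omega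
      have hA : calcLoop (f + 1 + 1) i c = calcLoop (f + 1) (4 * (i / 5)) (c + 1) := by
        rw [calcLoop, pmod i 2 (by norm_num), pmod i 3 (by norm_num),
          pmod i 5 (by norm_num), pdiv (4 * i) 5 (by norm_num)]
        simp [h1, h2, h3, h5, hk]
      have hB : altFrom i c = altFrom (4 * (i / 5)) (c + 1) := by
        unfold altFrom
        rw [sF2_stop h2, sF2_step hk0 (by omega),
          show (4 : Int) * (i / 5) / 2 = 2 * (i / 5) by omega,
          sF2_step (by omega : (2 : Int) * (i / 5) ≠ 0) (by omega),
          show (2 : Int) * (i / 5) / 2 = i / 5 by omega, sF2_stop hko,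
          s3_stop h3, s3_stop hk3, s5_step h0 h5,
          show c + 1 + 1 + 1 = c + 3 from by ring]
      rw [hA, hB]
      exact ih _ _ (by omega) hk0
    · -- no divisor applies: both return -1.
      have hA : calcLoop (f + 1 + 1) i c = -1 := by
        rw [calcLoop, pmod i 2 (by norm_num), pmod i 3 (by norm_num),
          pmod i 5 (by norm_num)]
        simp [h1, h2, h3, h5]
      rw [hA]
      unfold altFrom
      rw [sF2_stop h2, s3_stop h3, s5_stop h5]
      simp [finish5, h1]

-- ===== VERDICT (by name: the statement is the Claim_ definition above) =====
theorem calculate_spec : Claim_equal_calculate := by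
  intro i _ hpre
  show calculate i = calculate_alt i
  have halt : calculate_alt i = altFrom i 0 := rfl
  rw [halt]
  exact loop_eq i.natAbs i 0 le_rfl hpre
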